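-- pv_equiv track=rewrite | github.com/ksomemo/Competitive-programming | atcoder/abc/106/D.py | TLE
-- ===== SOURCE A (Python) =====
-- def TLE(N, M, Q, L, R, p, q):
--     """
--     10^5 * 10^5
--     """
--     answers = []
--     for _p, _q in zip(p, q):
--         ans = 0
--         for left, right in zip(L, R):
--             if _p <= left and right <= _q:
--                 ans += 1
--
--         answers.append(ans)
--
--     return answers
-- ===== SOURCE B (Python) =====
-- def _bisect_right(a, x):
--     # verbatim standard-library binary search (bisect.bisect_right's algorithm)
--     lo, hi = 0, len(a)
--     while lo < hi:
--         mid = (lo + hi) // 2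
--         if x < a[mid]:
--             hi = mid
--         else:
--             lo = mid + 1
--     return lo
--
--
-- def TLE(N, M, Q, L, R, p, q):
--     # Offline sweep: intervals sorted by left desc, queries sorted by p desc;
--     # a sorted list of active right endpoints answers each query by binary search.
--     intervals = sorted(zip(L, R), key=lambda t: t[0], reverse=True)
--     order = sorted(enumerate(zip(p, q)), key=lambda t: t[1][0], reverse=True)
--     answers = [0] * len(order)
--     act = []
--     i = 0
--     for j, (pp, qq) in order:
--         while i < len(intervals) and pp <= intervals[i][0]:
--             r = intervals[i][1]
--             act.insert(_bisect_right(act, r), r)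
--             i += 1
--         answers[j] = _bisect_right(act, qq)
--     return answers
-- ===== Notes on version B (the rewrite author's own statement) =====
-- stated objective: faster
-- what changed: Replaces the per-query linear scan of all intervals by an offline sweep: intervals sorted by left endpoint descending and queries sorted by p descending are merged with a pointer, maintaining a sorted list of active right endpoints that answers each query by binary search.
import Mathlib
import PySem

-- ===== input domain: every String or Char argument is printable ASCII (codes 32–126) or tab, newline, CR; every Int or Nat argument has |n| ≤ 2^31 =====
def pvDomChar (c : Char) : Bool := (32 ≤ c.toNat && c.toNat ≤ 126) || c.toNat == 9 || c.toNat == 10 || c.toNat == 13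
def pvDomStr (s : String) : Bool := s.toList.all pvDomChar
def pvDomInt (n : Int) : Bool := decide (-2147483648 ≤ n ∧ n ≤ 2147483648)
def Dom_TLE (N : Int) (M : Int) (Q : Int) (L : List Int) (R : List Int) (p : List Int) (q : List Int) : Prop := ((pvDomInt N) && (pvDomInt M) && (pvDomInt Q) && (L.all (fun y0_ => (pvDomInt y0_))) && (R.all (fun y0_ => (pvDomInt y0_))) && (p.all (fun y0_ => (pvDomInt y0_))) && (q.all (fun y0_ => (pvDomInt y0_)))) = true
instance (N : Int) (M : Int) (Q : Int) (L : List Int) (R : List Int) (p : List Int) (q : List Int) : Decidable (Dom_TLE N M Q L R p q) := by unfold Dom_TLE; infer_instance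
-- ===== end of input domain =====

-- B replaces A's per-query scan of all intervals by an offline sweep (sort + merge +
-- binary search over active right endpoints); equivalence of the return values is proved below.
-- ===== PORT A =====
def TLE (N : Int) (M : Int) (Q : Int) (L : List Int) (R : List Int) (p : List Int) (q : List Int) : List Int :=
  (p.zip q).foldl (fun answers pq =>
    let ans : Int := (L.zip R).foldl (fun ans lr =>
      if pq.1 ≤ lr.1 ∧ lr.2 ≤ pq.2 then ans + 1 else ans) 0
    answers ++ [ans]) []

-- ===== PORT B =====
-- _bisect_right in Source B is a verbatim copy of the standard library's bisect_right algorithm;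
-- it is ported as the PySem primitive that implements exactly that binary search.
-- the inner 'while i < len(intervals) and pp <= intervals[i][0]: act.insert(_bisect_right(act, r), r)'
def altAdvance (pp : Int) : List (Int × Int) → List Int → List (Int × Int) × List Int
  | [], act => ([], act)
  | lr :: rest, act =>
    if pp ≤ lr.1 then
      altAdvance pp rest (PySem.List.insert act ((PySem.List.bisectRight act lr.2 : Nat) : Int) lr.2)
    else (lr :: rest, act)

-- the outer 'for j, (pp, qq) in order: … answers[j] = _bisect_right(act, qq)'
def altMain : List (Int × (Int × Int)) → List (Int × Int) → List Int → List Int → List Int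
  | [], _, _, answers => answers
  | (j, pq) :: rest, rem, act, answers =>
    let s := altAdvance pq.1 rem act
    altMain rest s.1 s.2 (PySem.List.pySetD answers j ((PySem.List.bisectRight s.2 pq.2 : Nat) : Int))

def TLE_alt (N : Int) (M : Int) (Q : Int) (L : List Int) (R : List Int) (p : List Int) (q : List Int) : List Int :=
  let intervals := PySem.List.sorted (L.zip R) (fun t => t.1) true
  let order := PySem.List.sorted (PySem.List.enumerate (p.zip q) 0) (fun t => t.2.1) true
  altMain order intervals [] (List.replicate order.length 0)


-- ===== PRECONDITION & SPEC =====
def Spec_TLE (N : Int) (M : Int) (Q : Int) (L : List Int) (R : List Int) (p : List Int) (q : List Int) (out : List Int) : Prop := out = TLE_alt N M Q L R p q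
instance (N : Int) (M : Int) (Q : Int) (L : List Int) (R : List Int) (p : List Int) (q : List Int) (out : List Int) : Decidable (Spec_TLE N M Q L R p q out) := by unfold Spec_TLE; infer_instance

-- ===== CLAIM (what is proved, stated in full; the proofs are below) =====
def Claim_equal_TLE : Prop := ∀ (N : Int) (M : Int) (Q : Int) (L : List Int) (R : List Int) (p : List Int) (q : List Int), Dom_TLE N M Q L R p q → Spec_TLE N M Q L R p q (TLE N M Q L R p q)

-- ===== LEMMAS AND PROOFS =====

-- the per-query count both programs compute, as a function of the interval list
def tgt (ivs : List (Int × Int)) (pp qq : Int) : Int :=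
  (ivs.countP (fun lr => decide (pp ≤ lr.1 ∧ lr.2 ≤ qq)) : Int)

-- A is the map of per-query counts over the zipped queries
theorem A_eq (N M Q : Int) (L R p q : List Int) :
    TLE N M Q L R p q = (p.zip q).map (fun pq => tgt (L.zip R) pq.1 pq.2) := by
  unfold TLE
  rw [PySem.List.foldl_append_singleton_eq_map]
  simp [tgt, PySem.List.foldl_ite_add_one]

-- bisect_right on a sorted list returns the number of elements ≤ x
theorem bisect_count (xs : List Int) (x : Int) (h : xs.Pairwise (· ≤ ·)) :
    PySem.List.bisectRight xs x = xs.countP (fun r => decide (r ≤ x)) := by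
  obtain ⟨hle, hpre, hsuf⟩ := PySem.List.bisectRight_spec xs x h
  set k := PySem.List.bisectRight xs x with hk
  rw [← List.take_append_drop k xs, List.countP_append]
  have h1 : (xs.take k).countP (fun r => decide (r ≤ x)) = (xs.take k).length := by
    apply List.countP_eq_length.mpr
    intro a ha
    obtain ⟨j, hj, rfl⟩ := List.mem_take_iff_getElem.mp ha
    simpa using hpre j (by omega) (by omega)
  have h2 : (xs.drop k).countP (fun r => decide (r ≤ x)) = 0 := by
    apply List.countP_eq_zero.mpr
    intro a ha
    obtain ⟨j, hj, rfl⟩ := List.getElem_of_mem ha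
    have hj' : k + j < xs.length := by rw [List.length_drop] at hj; omega
    rw [List.getElem_drop]
    have := hsuf (k + j) hj' (by omega)
    simp; omega
  rw [h1, h2, List.length_take]
  omega

-- inserting at the bisect_right position keeps the list sorted and adds exactly v
theorem insort_facts (xs : List Int) (v : Int) (h : xs.Pairwise (· ≤ ·)) :
    (PySem.List.insert xs ((PySem.List.bisectRight xs v : Nat) : Int) v).Pairwise (· ≤ ·) ∧
    (PySem.List.insert xs ((PySem.List.bisectRight xs v : Nat) : Int) v).Perm (v :: xs) := by
  obtain ⟨hle, hpre, hsuf⟩ := PySem.List.bisectRight_spec xs v h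
  set k := PySem.List.bisectRight xs v with hk
  rw [PySem.List.insert_natCast xs k v hle]
  have htake : ∀ a ∈ xs.take k, a ≤ v := by
    intro a ha
    obtain ⟨j, hj, rfl⟩ := List.mem_take_iff_getElem.mp ha
    exact hpre j (by omega) (by omega)
  have hdrop : ∀ b ∈ xs.drop k, v < b := by
    intro b hb
    obtain ⟨j, hj, rfl⟩ := List.getElem_of_mem hb
    have hj' : k + j < xs.length := by rw [List.length_drop] at hj; omega
    rw [List.getElem_drop]
    exact hsuf (k + j) hj' (by omega)
  have hsplit := List.take_append_drop k xs
  have h' : (xs.take k ++ xs.drop k).Pairwise (· ≤ ·) := by rw [hsplit]; exact h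
  have hpair := List.pairwise_append.mp h'
  constructor
  · rw [List.pairwise_append]
    refine ⟨hpair.1, ?_, ?_⟩
    · rw [List.pairwise_cons]
      exact ⟨fun b hb => le_of_lt (hdrop b hb), hpair.2.1⟩
    · intro a ha b hb
      rcases List.mem_cons.mp hb with rfl | hb
      · exact htake a ha
      · exact hpair.2.2 a ha b hb
  · exact (List.perm_middle).trans (by rw [hsplit])

-- after the pointer stops, every remaining interval has left endpoint < pp
theorem dropWhile_lt (pp : Int) (rem : List (Int × Int))
    (h : rem.Pairwise (fun a b => b.1 ≤ a.1)) :
    ∀ x ∈ rem.dropWhile (fun lr => decide (pp ≤ lr.1)), x.1 < pp := by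
  induction rem with
  | nil => simp
  | cons hd tl ih =>
    rw [List.dropWhile_cons]
    obtain ⟨hhd, htl⟩ := List.pairwise_cons.mp h
    split
    · exact ih htl
    · next hc =>
      intro x hx
      rcases List.mem_cons.mp hx with rfl | hx
      · simpa using hc
      · have := hhd x hx
        simp at hc
        omega

-- the while loop consumes exactly the takeWhile prefix and inserts its right endpoints
theorem advance_spec (pp : Int) : ∀ (rem : List (Int × Int)) (act : List Int),
    act.Pairwise (· ≤ ·) →
    (altAdvance pp rem act).1 = rem.dropWhile (fun lr => decide (pp ≤ lr.1)) ∧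
    (altAdvance pp rem act).2.Pairwise (· ≤ ·) ∧
    (altAdvance pp rem act).2.Perm
      (act ++ (rem.takeWhile (fun lr => decide (pp ≤ lr.1))).map (·.2)) := by
  intro rem
  induction rem with
  | nil => intro act hact; simpa [altAdvance] using hact
  | cons lr rest ih =>
    intro act hact
    rw [List.dropWhile_cons, List.takeWhile_cons]
    by_cases hc : pp ≤ lr.1
    · have hins := insort_facts act lr.2 hact
      obtain ⟨h1, h2, h3⟩ := ih _ hins.1
      refine ⟨?_, ?_, ?_⟩
      · simpa [altAdvance, hc] using h1
      · simpa [altAdvance, hc] using h2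
      · have : (altAdvance pp (lr :: rest) act).2 = (altAdvance pp rest (PySem.List.insert act ((PySem.List.bisectRight act lr.2 : Nat) : Int) lr.2)).2 := by
          simp [altAdvance, hc]
        rw [this]
        refine h3.trans ?_
        simp only [hc, decide_true, if_true, List.map_cons]
        exact (hins.2.append_right _).trans List.perm_middle.symm
    · simp [altAdvance, hc, hact]

-- loop invariant of the sweep: each query receives its count over the full interval list
theorem main_spec (ivs : List (Int × Int)) (hdesc : ivs.Pairwise (fun a b => b.1 ≤ a.1)) :
    ∀ (rest : List (Int × (Int × Int))) (c rem : List (Int × Int)) (act answers : List Int),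
    ivs = c ++ rem →
    act.Pairwise (· ≤ ·) → act.Perm (c.map (·.2)) →
    (∀ e ∈ rest, ∀ x ∈ c, e.2.1 ≤ x.1) →
    rest.Pairwise (fun a b => b.2.1 ≤ a.2.1) →
    altMain rest rem act answers =
      rest.foldl (fun ans e => PySem.List.pySetD ans e.1 (tgt ivs e.2.1 e.2.2)) answers := by
  intro rest
  induction rest with
  | nil => intro c rem act answers _ _ _ _ _; simp [altMain]
  | cons e rest ih =>
    obtain ⟨j, pq⟩ := e
    intro c rem act answers hsplit hact hperm hc hq
    obtain ⟨hqhd, hqtl⟩ := List.pairwise_cons.mp hq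
    have hivs : (c ++ rem).Pairwise (fun a b => b.1 ≤ a.1) := by rw [← hsplit]; exact hdesc
    have hremp : rem.Pairwise (fun a b => b.1 ≤ a.1) := (List.pairwise_append.mp hivs).2.1
    obtain ⟨h1, h2, h3⟩ := advance_spec pq.1 rem act hact
    set s := altAdvance pq.1 rem act with hs
    set tw := rem.takeWhile (fun lr => decide (pq.1 ≤ lr.1)) with htw
    set dw := rem.dropWhile (fun lr => decide (pq.1 ≤ lr.1)) with hdw
    have hsplit' : ivs = (c ++ tw) ++ dw := by
      rw [hsplit, List.append_assoc, htw, hdw, List.takeWhile_append_dropWhile]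
    have hperm' : s.2.Perm ((c ++ tw).map (·.2)) := by
      rw [List.map_append]
      exact h3.trans (hperm.append_right _)
    have htw1 : ∀ x ∈ tw, pq.1 ≤ x.1 := by
      intro x hx
      have := List.mem_takeWhile_imp hx
      simpa using this
    have hc' : ∀ e' ∈ rest, ∀ x ∈ c ++ tw, e'.2.1 ≤ x.1 := by
      intro e' he' x hx
      rcases List.mem_append.mp hx with hx | hx
      · exact hc e' (List.mem_cons_of_mem _ he') x hx
      · exact le_trans (hqhd e' he') (htw1 x hx)
    have hval : ((PySem.List.bisectRight s.2 pq.2 : Nat) : Int) = tgt ivs pq.1 pq.2 := by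
      rw [bisect_count s.2 pq.2 h2]
      rw [List.Perm.countP_eq _ hperm']
      rw [List.countP_map]
      unfold tgt
      rw [hsplit', List.countP_append]
      have hz : dw.countP (fun lr => decide (pq.1 ≤ lr.1 ∧ lr.2 ≤ pq.2)) = 0 := by
        apply List.countP_eq_zero.mpr
        intro a ha
        have := dropWhile_lt pq.1 rem hremp a (hdw ▸ ha)
        simp; omega
      have hc1 : c.countP ((fun r => decide (r ≤ pq.2)) ∘ (·.2)) =
          c.countP (fun lr => decide (pq.1 ≤ lr.1 ∧ lr.2 ≤ pq.2)) := by
        apply List.countP_congr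
        intro x hx
        have hx1 : pq.1 ≤ x.1 := hc (j, pq) (List.mem_cons_self) x hx
        simp [hx1]
      have hc2 : tw.countP ((fun r => decide (r ≤ pq.2)) ∘ (·.2)) =
          tw.countP (fun lr => decide (pq.1 ≤ lr.1 ∧ lr.2 ≤ pq.2)) := by
        apply List.countP_congr
        intro x hx
        have hx1 : pq.1 ≤ x.1 := htw1 x hx
        simp [hx1]
      rw [List.countP_append, List.countP_append, hc1, hc2, hz]
      push_cast
      ring
    show altMain ((j, pq) :: rest) rem act answers = _
    rw [List.foldl_cons]
    have hstep : altMain ((j, pq) :: rest) rem act answers =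
        altMain rest s.1 s.2 (PySem.List.pySetD answers j ((PySem.List.bisectRight s.2 pq.2 : Nat) : Int)) := rfl
    rw [hstep, hval, h1]
    exact ih (c ++ tw) dw s.2 _ hsplit' h2 hperm' hc' hqtl

-- answers[j] = v scattering: length is preserved …
theorem scatter_length (g : Int × (Int × Int) → Int) :
    ∀ (es : List (Int × (Int × Int))) (ans : List Int),
    (es.foldl (fun a e => PySem.List.pySetD a e.1 (g e)) ans).length = ans.length := by
  intro es
  induction es with
  | nil => simp
  | cons e es ih => intro ans; rw [List.foldl_cons, ih, PySem.List.length_pySetD]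

-- … positions not written keep their value …
theorem scatter_notmem (g : Int × (Int × Int) → Int) (m : Nat) :
    ∀ (es : List (Int × (Int × Int))) (ans : List Int),
    (∀ e ∈ es, 0 ≤ e.1) → ((m : Int) ∉ es.map (·.1)) →
    (es.foldl (fun a e => PySem.List.pySetD a e.1 (g e)) ans)[m]? = ans[m]? := by
  intro es
  induction es with
  | nil => simp
  | cons e es ih =>
    intro ans hpos hm
    simp only [List.map_cons, List.mem_cons, not_or] at hm
    rw [List.foldl_cons, ih _ (fun e' he' => hpos e' (List.mem_cons_of_mem _ he')) hm.2]
    rw [PySem.List.pySetD_of_nonneg _ _ (h := hpos e (List.mem_cons_self))]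
    apply List.getElem?_set_ne
    intro hcon
    apply hm.1
    have := hpos e (List.mem_cons_self)
    omega

-- … and a written position holds its value when the indices are distinct
theorem scatter_mem (g : Int × (Int × Int) → Int) (m : Nat) :
    ∀ (es : List (Int × (Int × Int))) (ans : List Int) (e : Int × (Int × Int)),
    (∀ e' ∈ es, 0 ≤ e'.1) → es.Pairwise (fun a b => a.1 ≠ b.1) →
    e ∈ es → e.1 = (m : Int) → m < ans.length →
    (es.foldl (fun a e => PySem.List.pySetD a e.1 (g e)) ans)[m]? = some (g e) := by
  intro es
  induction es with
  | nil => simp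
  | cons e0 es ih =>
    intro ans e hpos hpair hmem hid hlen
    obtain ⟨hhd, htl⟩ := List.pairwise_cons.mp hpair
    rcases List.mem_cons.mp hmem with rfl | hmem
    · rw [List.foldl_cons]
      have hnot : ((m : Int)) ∉ es.map (·.1) := by
        intro hcon
        obtain ⟨b, hb, hb1⟩ := List.mem_map.mp hcon
        exact hhd b hb (by rw [hid, hb1])
      rw [scatter_notmem g m es _ (fun e' he' => hpos e' (List.mem_cons_of_mem _ he')) hnot]
      rw [PySem.List.pySetD_of_nonneg _ _ (h := hpos e (List.mem_cons_self))]
      have : e.1.toNat = m := by have := hpos e (List.mem_cons_self); omega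
      rw [this]
      exact List.getElem?_set_self (by omega)
    · rw [List.foldl_cons]
      exact ih _ e (fun e' he' => hpos e' (List.mem_cons_of_mem _ he')) htl hmem hid
        (by rw [PySem.List.length_pySetD]; omega)

-- assembling both sides
theorem final (N M Q : Int) (L R p q : List Int) :
    TLE N M Q L R p q = TLE_alt N M Q L R p q := by
  rw [A_eq]
  unfold TLE_alt
  set pairs := L.zip R with hpairs
  set pqz := p.zip q with hpqz
  set ivs := PySem.List.sorted pairs (fun t => t.1) true with hivs
  set ord := PySem.List.sorted (PySem.List.enumerate pqz 0) (fun t => t.2.1) true with hord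
  have hivsperm : ivs.Perm pairs := PySem.List.sorted_perm _ _ _
  have hordperm : ord.Perm (PySem.List.enumerate pqz 0) := PySem.List.sorted_perm _ _ _
  have htgt : ∀ pp qq, tgt ivs pp qq = tgt pairs pp qq := by
    intro pp qq; unfold tgt
    rw [List.Perm.countP_eq _ hivsperm]
  have hmainspec := main_spec ivs (PySem.List.sorted_pairwise_rev pairs (fun t => t.1)) ord [] ivs []
    (List.replicate ord.length 0) rfl (by simp) (by simp)
    (by intro e _ x hx; simp at hx)
    (PySem.List.sorted_pairwise_rev _ _)
  rw [hmainspec]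
  set g : Int × (Int × Int) → Int := fun e => tgt ivs e.2.1 e.2.2 with hg
  have hK : ord.length = pqz.length := by
    rw [hordperm.length_eq, PySem.List.length_enumerate]
  have hpos : ∀ e ∈ ord, 0 ≤ e.1 := by
    intro e he
    obtain ⟨k, hk, rfl⟩ := (PySem.List.mem_enumerate_iff _ _ _).mp (hordperm.mem_iff.mp he)
    simp
  have hdist : ord.Pairwise (fun a b => a.1 ≠ b.1) := by
    have h1 : (PySem.List.enumerate pqz 0).Pairwise (fun a b => a.1 ≠ b.1) :=
      (PySem.List.pairwise_lt_enumerate pqz 0).imp (fun h => ne_of_lt h)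
    exact ((List.Perm.pairwise_iff (fun {a b} h => h ∘ Eq.symm)) hordperm).mpr h1
  apply List.ext_getElem?
  intro n
  rw [List.getElem?_map]
  by_cases hn : n < pqz.length
  · have hmem : ((n : Int), pqz[n]) ∈ ord := by
      apply hordperm.mem_iff.mpr
      apply (PySem.List.mem_enumerate_iff _ _ _).mpr
      exact ⟨n, hn, by simp⟩
    rw [scatter_mem g n ord _ ((n : Int), pqz[n]) hpos hdist hmem rfl
      (by rw [List.length_replicate]; omega)]
    rw [List.getElem?_eq_getElem hn]
    simp [hg, htgt]
  · rw [List.getElem?_eq_none (l := pqz) (by omega)]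
    rw [List.getElem?_eq_none (by rw [scatter_length, List.length_replicate]; omega)]
    rfl

-- ===== VERDICT (by name: the statement is the Claim_ definition above) =====
theorem TLE_spec : Claim_equal_TLE := by
  intro N M Q L R p q _
  unfold Spec_TLE
  exact final N M Q L R p q
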